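-- pv_equiv track=rewrite | github.com/ArthurVerrez/project-euler | PE57.py | count_digits_m
-- ===== SOURCE A (Python) =====
-- def more_digits(t):
--     a=t[0]
--     b=t[1]
--     return len(str(a))>len(str(b))
--
-- def count_digits_m(n=1000):
--     tab=1001*[(0,0)]
--     def aux_exp_m(n):
--         if n==1:
--             return (2,1)
--         if tab[n][1]>0:
--             return tab[n]
--         a,b=aux_exp_m(n-1)
--         tab[n]=(2*a+b,a)
--         return (2*a+b,a)
--
--     def expansion_m(n):
--         a,b=aux_exp_m(n)
--         return (a+b,a)
--
--     c=0
--     for i in range(1,n+1):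
--         if more_digits(expansion_m(i)):
--             c+=1
--     return c
-- ===== SOURCE B (Python) =====
-- def count_digits_m(n=1000):
--     c = 0
--     num, den = 3, 2
--     for _ in range(max(n, 0)):
--         if len(str(num)) > len(str(den)):
--             c += 1
--         num, den = num + 2 * den, num + den
--     return c
-- ===== Notes on version B (the rewrite author's own statement) =====
-- stated objective: simpler
-- what changed: Replaces the memoized recursion over a preallocated 1001-slot table with a direct two-variable iteration (num,den) -> (num+2*den, num+den) counting digit-length differences in one pass.
import Mathlib
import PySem

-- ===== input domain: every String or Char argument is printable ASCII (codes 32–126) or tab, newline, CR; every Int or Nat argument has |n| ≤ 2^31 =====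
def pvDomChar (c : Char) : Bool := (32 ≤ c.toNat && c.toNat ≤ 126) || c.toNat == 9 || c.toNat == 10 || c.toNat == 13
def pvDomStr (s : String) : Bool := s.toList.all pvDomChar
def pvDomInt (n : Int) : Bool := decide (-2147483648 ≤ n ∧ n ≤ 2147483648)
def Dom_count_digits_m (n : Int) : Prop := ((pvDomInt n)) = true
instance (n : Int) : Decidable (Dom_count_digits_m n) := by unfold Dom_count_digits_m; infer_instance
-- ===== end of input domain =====

set_option maxRecDepth 100000

-- B replaces A's memoized recursion over a 1001-slot table with a direct two-variable
-- iteration; objective: simpler. Pre_ excludes n > 1000, where A raises IndexError.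


-- ===== PORT A =====
def more_digitsA (t : Int × Int) : Bool :=
  let a := t.1
  let b := t.2
  PySem.Str.len (PySem.Int.toStr a) > PySem.Str.len (PySem.Int.toStr b)

-- aux_exp_m, recursing on n with the memo table threaded through.
-- (case 0 is unreachable: Python only ever calls aux_exp_m with n ≥ 1)
def auxA : Nat → List (Int × Int) → ((Int × Int) × List (Int × Int))
  | 0, tab => ((0, 0), tab)
  | 1, tab => ((2, 1), tab)
  | (k+2), tab =>
    let cur := tab.getD (k+2) (0, 0)
    if cur.2 > 0 then (cur, tab)
    else
      let r := auxA (k+1) tab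
      let v := (2 * r.1.1 + r.1.2, r.1.1)
      (v, r.2.set (k+2) v)

def stepA (st : List (Int × Int) × Int) (i : Int) : List (Int × Int) × Int :=
  let r := auxA i.toNat st.1
  let e := (r.1.1 + r.1.2, r.1.1)  -- expansion_m
  (r.2, if more_digitsA e then st.2 + 1 else st.2)

def count_digits_m (n : Int) : Int :=
  ((PySem.List.pyRange 1 (n+1) 1).foldl stepA (List.replicate 1001 ((0:Int), (0:Int)), 0)).2

-- ===== PORT B =====
def stepB (st : Int × Int × Int) (_i : Nat) : Int × Int × Int :=
  (if PySem.Str.len (PySem.Int.toStr st.2.1) > PySem.Str.len (PySem.Int.toStr st.2.2) then st.1 + 1 else st.1,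
   st.2.1 + 2 * st.2.2, st.2.1 + st.2.2)

def count_digits_m_alt (n : Int) : Int :=
  ((List.range (max n 0).toNat).foldl stepB ((0:Int), (3:Int), (2:Int))).1

-- ===== PRECONDITION & SPEC =====
-- A raises IndexError (memo table of 1001 slots) for n > 1000.
def Pre_count_digits_m (n : Int) : Prop := n ≤ 1000
instance (n : Int) : Decidable (Pre_count_digits_m n) := by unfold Pre_count_digits_m; infer_instance
def pvWitness_count_digits_m : Int := 8

def Spec_count_digits_m (n : Int) (out : Int) : Prop := out = count_digits_m_alt n
instance (n : Int) (out : Int) : Decidable (Spec_count_digits_m n out) := by unfold Spec_count_digits_m; infer_instance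

-- ===== CLAIM (what is proved, stated in full; the proofs are below) =====
def Claim_equal_count_digits_m : Prop := ∀ (n : Int), Dom_count_digits_m n → Pre_count_digits_m n → Spec_count_digits_m n (count_digits_m n)

-- ===== LEMMAS AND PROOFS =====

-- the pure convergent sequence: fA (k+1) = aux_exp_m(k+1)'s value
def fA : Nat → Int × Int
  | 0 => (0, 0)
  | 1 => (2, 1)
  | (k+2) => (2 * (fA (k+1)).1 + (fA (k+1)).2, (fA (k+1)).1)

-- the memo table after entries 2..m have been filled
def tabAt (m : Nat) : List (Int × Int) :=
  (List.range 1001).map (fun j => if 2 ≤ j ∧ j ≤ m then fA j else (0, 0))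

-- the count after the first m convergents
def cnt : Nat → Int
  | 0 => 0
  | (k+1) => cnt k + (if more_digitsA ((fA (k+1)).1 + (fA (k+1)).2, (fA (k+1)).1) then 1 else 0)

theorem fA_pos : ∀ k, 0 < (fA (k+1)).1 ∧ 0 < (fA (k+1)).2 := by
  intro k
  induction k with
  | zero => simp [fA]
  | succ k ih => simp [fA]; omega

theorem tabAt_getD (m j : Nat) (hj : j < 1001) :
    (tabAt m).getD j (0, 0) = if 2 ≤ j ∧ j ≤ m then fA j else (0, 0) := by
  simp [tabAt, List.getD_eq_getElem?_getD, hj]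

theorem tabAt_zero_one : tabAt 0 = tabAt 1 := by
  unfold tabAt
  apply List.map_congr_left
  intro j _
  split_ifs with h1 h2 <;> first | rfl | omega

theorem tabAt_set (i : Nat) (h1 : 1 ≤ i) (h2 : i + 1 < 1001) :
    (tabAt i).set (i+1) (fA (i+1)) = tabAt (i+1) := by
  apply List.ext_getElem?
  intro j
  by_cases hj : j < 1001
  · rw [List.getElem?_set]
    simp only [tabAt, List.getElem?_map, List.getElem?_range, List.length_map, List.length_range, hj]
    by_cases he : j = i + 1
    · subst he; simp [hj]; omega
    · simp
      split_ifs with p q <;> first | rfl | omega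
  · have l1 : (tabAt i).length = 1001 := by simp [tabAt]
    have l2 : (tabAt (i+1)).length = 1001 := by simp [tabAt]
    rw [List.getElem?_eq_none (by simpa [l1] using Nat.le_of_not_lt hj),
        List.getElem?_eq_none (by simpa [l2] using Nat.le_of_not_lt hj)]

theorem aux_hit (m i : Nat) (h1 : 1 ≤ i) (h2 : i ≤ m) (h3 : i ≤ 1000) :
    auxA i (tabAt m) = (fA i, tabAt m) := by
  match i with
  | 1 => rfl
  | (k+2) =>
    have hg : (tabAt m).getD (k+2) (0, 0) = fA (k+2) := by
      rw [tabAt_getD m (k+2) (by omega), if_pos ⟨by omega, h2⟩]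
    have hp : 0 < (fA (k+2)).2 := by
      show 0 < (fA (k+1)).1
      exact (fA_pos k).1
    show auxA (k+2) (tabAt m) = (fA (k+2), tabAt m)
    unfold auxA
    simp only [hg]
    rw [if_pos hp]

theorem aux_step (i : Nat) (h1 : 1 ≤ i) (h3 : i ≤ 1000) :
    auxA i (tabAt (i-1)) = (fA i, tabAt i) := by
  match i with
  | 1 =>
    show auxA 1 (tabAt 0) = (fA 1, tabAt 1)
    rw [← tabAt_zero_one]
    rfl
  | (k+2) =>
    have hg : (tabAt (k+1)).getD (k+2) (0, 0) = (0, 0) := by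
      rw [tabAt_getD (k+1) (k+2) (by omega), if_neg (by omega)]
    have hh := aux_hit (k+1) (k+1) (by omega) (le_refl _) (by omega)
    have hs := tabAt_set (k+1) (by omega) (by omega)
    show auxA (k+2) (tabAt (k+1)) = (fA (k+2), tabAt (k+2))
    unfold auxA
    simp only [hg, hh]
    rw [if_neg (show ¬(((0:Int), (0:Int)).2 > 0) by norm_num)]
    show ((2 * (fA (k+1)).1 + (fA (k+1)).2, (fA (k+1)).1),
          (tabAt (k+1)).set (k+2) (2 * (fA (k+1)).1 + (fA (k+1)).2, (fA (k+1)).1))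
        = (fA (k+2), tabAt (k+2))
    rw [show (2 * (fA (k+1)).1 + (fA (k+1)).2, (fA (k+1)).1) = fA (k+2) from rfl, hs]

theorem replicate_eq_tabAt_zero : List.replicate 1001 ((0:Int), (0:Int)) = tabAt 0 := by
  unfold tabAt
  have h : (List.range 1001).map (fun j => if 2 ≤ j ∧ j ≤ 0 then fA j else ((0:Int), (0:Int)))
      = (List.range 1001).map (fun _ => ((0:Int), (0:Int))) :=
    List.map_congr_left (fun j _ => by rw [if_neg (by omega)])
  rw [h, List.map_const', List.length_range]

theorem loopA (m : Nat) (hm : m ≤ 1000) :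
    (PySem.List.pyRange 1 ((m : Int) + 1) 1).foldl stepA (tabAt 0, 0) = (tabAt m, cnt m) := by
  induction m with
  | zero => rw [PySem.List.pyRange_one_eq_nil (by omega)]; rfl
  | succ m ih =>
    have hsplit : PySem.List.pyRange 1 ((m : Int) + 1 + 1) 1
        = PySem.List.pyRange 1 ((m : Int) + 1) 1 ++ [(m : Int) + 1] := by
      simpa using PySem.List.pyRange_one_succ_right (a := 1) (b := (m : Int) + 1) (by omega)
    rw [show ((m + 1 : Nat) : Int) + 1 = (m : Int) + 1 + 1 by push_cast; ring]
    rw [hsplit, List.foldl_append, ih (by omega)]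
    show stepA (tabAt m, cnt m) ((m : Int) + 1) = _
    unfold stepA
    rw [show ((m : Int) + 1).toNat = m + 1 by omega]
    have hstep := aux_step (m+1) (by omega) (by omega)
    simp only [Nat.add_sub_cancel] at hstep
    rw [hstep]
    refine Prod.ext rfl ?_
    show (if more_digitsA ((fA (m+1)).1 + (fA (m+1)).2, (fA (m+1)).1) then cnt m + 1 else cnt m) = cnt (m+1)
    simp only [cnt]
    split_ifs <;> omega

theorem loopB (m : Nat) :
    (List.range m).foldl stepB ((0:Int), (3:Int), (2:Int))
      = (cnt m, (fA (m+1)).1 + (fA (m+1)).2, (fA (m+1)).1) := by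
  induction m with
  | zero => simp [fA, cnt]
  | succ m ih =>
    rw [List.range_succ, List.foldl_append, ih]
    show stepB _ m = _
    unfold stepB
    simp only [cnt, fA, more_digitsA, Prod.mk.injEq, decide_eq_true_eq]
    refine ⟨by split_ifs <;> omega, by ring, by ring⟩

-- ===== VERDICT (by name: the statement is the Claim_ definition above) =====
theorem count_digits_m_spec : Claim_equal_count_digits_m := by
  intro n _ hpre
  unfold Spec_count_digits_m count_digits_m count_digits_m_alt
  by_cases h : n ≤ 0
  · rw [PySem.List.pyRange_one_eq_nil (by omega)]
    rw [show (max n 0).toNat = 0 by omega]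
    rfl
  · have hn : n = ((n.toNat : Nat) : Int) := by omega
    have hm : n.toNat ≤ 1000 := by unfold Pre_count_digits_m at hpre; omega
    rw [show (max n 0).toNat = n.toNat by omega]
    rw [replicate_eq_tabAt_zero]
    rw [show n + 1 = ((n.toNat : Nat) : Int) + 1 by omega]
    rw [loopA n.toNat hm, loopB n.toNat]
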